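-- pv_equiv track=rewrite | github.com/NikhilRaj-24/alpha-try | app.py | get_region_for_city
-- ===== SOURCE A (Python) =====
-- REGION_MAP = {
--     "Delhi-NCR": {
--         "Delhi": ["Delhi"],
--         "NCR": ["Gurgaon", "Noida", "Ghaziabad", "Faridabad"]
--     },
--     "North India": [
--         "Ludhiana", "Jalandhar", "Ambala", "Lucknow", "Meerut", "Chandigarh",
--         "Mohali", "Panchkula", "Kharar", "Dehradun"
--     ],
--     "East India": ["Kolkata", "Kharagpur"],
--     "West India": {
--         "Maharashtra": ["Mumbai", "Pune", "Thane", "Navi Mumbai", "Sangli", "Kalyan", "Badlapur", "Nashik"],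
--         "Gujarat": ["Ahmedabad", "Surat", "Vadodara"]
--     },
--     "South India": {
--         "Karnataka": ["Bangalore", "Mysore", "Gulbarga"],
--         "Telangana": ["Hyderabad", "Secunderabad", "Ranga Reddy"],
--         "Tamil Nadu": ["Chennai", "Coimbatore"]
--     }
-- }
--
-- def get_region_for_city(city: str) -> str:
--     for region, cities in REGION_MAP.items():
--         if isinstance(cities, dict):
--             for sub_region, sub_cities in cities.items():
--                 if city in sub_cities:
--                     return region
--         elif isinstance(cities, list):
--             if city in cities:
--                 return region
--     return "Unknown"
-- ===== SOURCE B (Python) =====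
-- # Flat (city, region) table kept sorted by city; lookup is a hand-written
-- # binary search instead of A's nested isinstance-dispatched scan.
-- _CITY_REGIONS = [
--     ('Ahmedabad', 'West India'),
--     ('Ambala', 'North India'),
--     ('Badlapur', 'West India'),
--     ('Bangalore', 'South India'),
--     ('Chandigarh', 'North India'),
--     ('Chennai', 'South India'),
--     ('Coimbatore', 'South India'),
--     ('Dehradun', 'North India'),
--     ('Delhi', 'Delhi-NCR'),
--     ('Faridabad', 'Delhi-NCR'),
--     ('Ghaziabad', 'Delhi-NCR'),
--     ('Gulbarga', 'South India'),
--     ('Gurgaon', 'Delhi-NCR'),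
--     ('Hyderabad', 'South India'),
--     ('Jalandhar', 'North India'),
--     ('Kalyan', 'West India'),
--     ('Kharagpur', 'East India'),
--     ('Kharar', 'North India'),
--     ('Kolkata', 'East India'),
--     ('Lucknow', 'North India'),
--     ('Ludhiana', 'North India'),
--     ('Meerut', 'North India'),
--     ('Mohali', 'North India'),
--     ('Mumbai', 'West India'),
--     ('Mysore', 'South India'),
--     ('Nashik', 'West India'),
--     ('Navi Mumbai', 'West India'),
--     ('Noida', 'Delhi-NCR'),
--     ('Panchkula', 'North India'),
--     ('Pune', 'West India'),
--     ('Ranga Reddy', 'South India'),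
--     ('Sangli', 'West India'),
--     ('Secunderabad', 'South India'),
--     ('Surat', 'West India'),
--     ('Thane', 'West India'),
--     ('Vadodara', 'West India'),
-- ]
--
--
-- def get_region_for_city(city: str) -> str:
--     lo, hi = 0, len(_CITY_REGIONS)
--     while lo < hi:
--         mid = (lo + hi) // 2
--         key, region = _CITY_REGIONS[mid]
--         if key < city:
--             lo = mid + 1
--         elif city < key:
--             hi = mid
--         else:
--             return region
--     return "Unknown"
-- ===== Notes on version B (the rewrite author's own statement) =====
-- stated objective: alternative
-- what changed: Replaces the nested isinstance-dispatched linear scan of REGION_MAP with a flat (city, region) table kept sorted by city and a hand-written binary search lookup.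
import Mathlib
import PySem

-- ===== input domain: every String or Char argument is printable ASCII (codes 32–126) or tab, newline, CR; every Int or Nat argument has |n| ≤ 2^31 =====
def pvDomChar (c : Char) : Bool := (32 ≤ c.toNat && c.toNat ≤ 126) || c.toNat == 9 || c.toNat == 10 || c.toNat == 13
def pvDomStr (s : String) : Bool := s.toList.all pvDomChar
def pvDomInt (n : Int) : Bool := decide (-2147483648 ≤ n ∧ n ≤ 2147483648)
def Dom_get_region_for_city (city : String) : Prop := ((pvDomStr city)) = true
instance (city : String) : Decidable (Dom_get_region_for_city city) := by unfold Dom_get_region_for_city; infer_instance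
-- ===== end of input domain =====

-- B replaces A's nested isinstance-dispatched linear scan with a flat (city, region)
-- table sorted by city and a hand-written binary search (alternative data structure).

-- ===== PORT A =====
-- REGION_MAP's values are either a list of cities or a sub-dict of city lists.
inductive RV where
  | lst : List String → RV
  | dct : List (String × List String) → RV
deriving DecidableEq, Repr

def REGION_MAP : List (String × RV) :=
  [("Delhi-NCR", RV.dct [("Delhi", ["Delhi"]),
                         ("NCR", ["Gurgaon", "Noida", "Ghaziabad", "Faridabad"])]),
   ("North India", RV.lst ["Ludhiana", "Jalandhar", "Ambala", "Lucknow", "Meerut", "Chandigarh",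
                           "Mohali", "Panchkula", "Kharar", "Dehradun"]),
   ("East India", RV.lst ["Kolkata", "Kharagpur"]),
   ("West India", RV.dct [("Maharashtra", ["Mumbai", "Pune", "Thane", "Navi Mumbai", "Sangli", "Kalyan", "Badlapur", "Nashik"]),
                          ("Gujarat", ["Ahmedabad", "Surat", "Vadodara"])]),
   ("South India", RV.dct [("Karnataka", ["Bangalore", "Mysore", "Gulbarga"]),
                           ("Telangana", ["Hyderabad", "Secunderabad", "Ranga Reddy"]),
                           ("Tamil Nadu", ["Chennai", "Coimbatore"])])]

-- A's inner loop over a sub-dict: true iff some sub_cities list contains city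
def aInner (city : String) : List (String × List String) → Bool
  | [] => false
  | (_, subCities) :: rest =>
      if subCities.contains city then true else aInner city rest

-- A's outer loop over REGION_MAP.items()
def aOuter (city : String) : List (String × RV) → String
  | [] => "Unknown"
  | (region, RV.dct subs) :: rest =>
      if aInner city subs then region else aOuter city rest
  | (region, RV.lst cities) :: rest =>
      if cities.contains city then region else aOuter city rest

def get_region_for_city (city : String) : String := aOuter city REGION_MAP

-- ===== PORT B =====
-- Source B's module constant: flat (city, region) pairs, sorted by city.
def CITY_REGIONS : List (String × String) :=
  [("Ahmedabad", "West India"), ("Ambala", "North India"), ("Badlapur", "West India"),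
   ("Bangalore", "South India"), ("Chandigarh", "North India"), ("Chennai", "South India"),
   ("Coimbatore", "South India"), ("Dehradun", "North India"), ("Delhi", "Delhi-NCR"),
   ("Faridabad", "Delhi-NCR"), ("Ghaziabad", "Delhi-NCR"), ("Gulbarga", "South India"),
   ("Gurgaon", "Delhi-NCR"), ("Hyderabad", "South India"), ("Jalandhar", "North India"),
   ("Kalyan", "West India"), ("Kharagpur", "East India"), ("Kharar", "North India"),
   ("Kolkata", "East India"), ("Lucknow", "North India"), ("Ludhiana", "North India"),
   ("Meerut", "North India"), ("Mohali", "North India"), ("Mumbai", "West India"),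
   ("Mysore", "South India"), ("Nashik", "West India"), ("Navi Mumbai", "West India"),
   ("Noida", "Delhi-NCR"), ("Panchkula", "North India"), ("Pune", "West India"),
   ("Ranga Reddy", "South India"), ("Sangli", "West India"), ("Secunderabad", "South India"),
   ("Surat", "West India"), ("Thane", "West India"), ("Vadodara", "West India")]

-- Source B's while-loop: lo/hi binary search.  lo, hi are Python ints that stay in
-- [0, len]; the index mid is always in range, so getD never uses its dummy.
-- Python's str '<' is lexicographic on code points = '<' on the char lists (exact).
def bsLoop (l : List (String × String)) (city : String) (lo hi : Nat) : String :=
  if _h : lo < hi then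
    let mid := (lo + hi) / 2
    let p := l.getD mid ("", "")
    if p.1.toList < city.toList then bsLoop l city (mid + 1) hi
    else if city.toList < p.1.toList then bsLoop l city lo mid
    else p.2
  else "Unknown"
termination_by hi - lo
decreasing_by all_goals omega

def get_region_for_city_alt (city : String) : String :=
  bsLoop CITY_REGIONS city 0 CITY_REGIONS.length

-- ===== PRECONDITION & SPEC =====
def Spec_get_region_for_city (city : String) (out : String) : Prop := out = get_region_for_city_alt city
instance (city : String) (out : String) : Decidable (Spec_get_region_for_city city out) := by unfold Spec_get_region_for_city; infer_instance

-- ===== CLAIM (what is proved, stated in full; the proofs are below) =====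
def Claim_equal_get_region_for_city : Prop := ∀ (city : String), Dom_get_region_for_city city → Spec_get_region_for_city city (get_region_for_city city)

-- ===== LEMMAS AND PROOFS =====

-- first-match association lookup with default "Unknown"
def lookupCity (l : List (String × String)) (city : String) : String :=
  match l.find? (fun p => p.1 == city) with
  | some p => p.2
  | none => "Unknown"

-- the region map flattened to (city, region) pairs in A's scan order
def bGroups : RV → List (List String)
  | RV.lst cities => [cities]
  | RV.dct subs => subs.map (·.2)

def flatten (m : List (String × RV)) : List (String × String) :=
  m.flatMap (fun p => ((bGroups p.2).flatMap id).map (fun c => (c, p.1)))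

theorem find?_map_append (city region : String) (cs : List String) (tail : List (String × String)) :
    (cs.map (fun c => (c, region)) ++ tail).find? (fun p => p.1 == city) =
      if cs.contains city then some (city, region) else tail.find? (fun p => p.1 == city) := by
  induction cs with
  | nil => simp
  | cons c cs ih =>
      by_cases h : c = city
      · simp [h]
      · simp [h, Ne.symm h, ih]

theorem lookup_map_append (city region : String) (cs : List String) (tail : List (String × String)) :
    lookupCity (cs.map (fun c => (c, region)) ++ tail) city =
      if cs.contains city then region else lookupCity tail city := by
  unfold lookupCity
  rw [find?_map_append]
  split_ifs <;> rfl

theorem aInner_eq_contains (city : String) (subs : List (String × List String)) :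
    aInner city subs = (subs.flatMap (·.2)).contains city := by
  induction subs with
  | nil => simp [aInner]
  | cons p rest ih =>
      obtain ⟨sr, sc⟩ := p
      simp only [aInner, List.flatMap_cons, List.contains_eq_any_beq, List.any_append, ih]
      by_cases h : sc.contains city
      · simp_all
      · simp_all

theorem aOuter_eq_flatten (city : String) (m : List (String × RV)) :
    aOuter city m = lookupCity (flatten m) city := by
  induction m with
  | nil => simp [aOuter, flatten, lookupCity]
  | cons p rest ih =>
      obtain ⟨region, rv⟩ := p
      cases rv with
      | lst cities =>
          have h1 : flatten ((region, RV.lst cities) :: rest) =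
              cities.map (fun c => (c, region)) ++ flatten rest := by
            simp [flatten, bGroups]
          rw [h1, lookup_map_append]
          simp only [aOuter]
          rw [ih]
      | dct subs =>
          have h1 : flatten ((region, RV.dct subs) :: rest) =
              (subs.flatMap (·.2)).map (fun c => (c, region)) ++ flatten rest := by
            simp [flatten, bGroups, List.flatMap_def]
          rw [h1, lookup_map_append]
          simp only [aOuter, aInner_eq_contains]
          rw [ih]

-- first-match lookup is invariant under permutation when keys are distinct
theorem find?_key_perm {l₁ l₂ : List (String × String)} (h : l₁.Perm l₂)
    (nd : (l₁.map Prod.fst).Nodup) (c : String) :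
    l₁.find? (fun p => p.1 == c) = l₂.find? (fun p => p.1 == c) := by
  induction h with
  | nil => rfl
  | cons x _ ih =>
      simp only [List.find?_cons]
      cases hx : (x.1 == c) with
      | true => rfl
      | false =>
          exact ih (by simpa using (List.nodup_cons.mp (by simpa using nd)).2)
  | swap x y l =>
      simp only [List.find?_cons]
      cases hx : (x.1 == c) with
      | true =>
          cases hy : (y.1 == c) with
          | true =>
              exfalso
              have hxc : x.1 = c := by simpa using hx
              have hyc : y.1 = c := by simpa using hy
              have : y.1 ∉ (x :: l).map Prod.fst := (List.nodup_cons.mp (by simpa using nd)).1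
              exact this (by simp [hxc, hyc])
          | false => rfl
      | false => rfl
  | trans h₁ h₂ ih₁ ih₂ =>
      rw [ih₁ nd, ih₂ ((h₁.map Prod.fst).nodup_iff.mp nd)]

-- strictly increasing keys, index form (keys compared as char lists)
theorem sorted_keys_lt {l : List (String × String)}
    (hs : l.Pairwise (fun a b => a.1.toList < b.1.toList))
    {i j : Nat} (hij : i < j) (hj : j < l.length) : l[i].1.toList < l[j].1.toList :=
  List.pairwise_iff_getElem.mp hs i j (Nat.lt_trans hij hj) hj hij

-- binary search finds the (unique) matching key in [lo, hi)
theorem bs_found (l : List (String × String)) (city : String)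
    (hs : l.Pairwise (fun a b => a.1.toList < b.1.toList)) :
    ∀ n lo hi, hi - lo ≤ n → hi ≤ l.length →
      ∀ i (hIdx : i < l.length), lo ≤ i → i < hi → l[i].1.toList = city.toList →
        bsLoop l city lo hi = l[i].2 := by
  intro n
  induction n with
  | zero => intro lo hi hn _ i _ h1 h2 _; omega
  | succ n ih =>
      intro lo hi hn hhi i hIdx h1 h2 hkey
      have hlt : lo < hi := Nat.lt_of_le_of_lt h1 h2
      have hmid : (lo + hi) / 2 < l.length := by omega
      rw [bsLoop]
      simp only [hlt, dite_true]
      rw [List.getD_eq_getElem l ("", "") hmid]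
      by_cases hc1 : l[(lo + hi) / 2].1.toList < city.toList
      · simp only [hc1, if_true]
        have hi_gt : (lo + hi) / 2 < i := by
          by_contra hle
          rcases Nat.lt_or_eq_of_le (not_lt.mp hle) with h | h
          · have hlt2 := sorted_keys_lt hs h hmid
            rw [hkey] at hlt2
            exact absurd hc1 (lt_asymm hlt2)
          · subst h
            rw [hkey] at hc1
            exact lt_irrefl _ hc1
        exact ih ((lo + hi) / 2 + 1) hi (by omega) hhi i hIdx hi_gt h2 hkey
      · simp only [hc1, if_false]
        by_cases hc2 : city.toList < l[(lo + hi) / 2].1.toList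
        · simp only [hc2, if_true]
          have hi_lt : i < (lo + hi) / 2 := by
            by_contra hle
            rcases Nat.lt_or_eq_of_le (not_lt.mp hle) with h | h
            · have hlt2 := sorted_keys_lt hs h hIdx
              rw [hkey] at hlt2
              exact absurd hlt2 (lt_asymm hc2)
            · subst h
              rw [hkey] at hc2
              exact lt_irrefl _ hc2
          exact ih lo ((lo + hi) / 2) (by omega) (by omega) i hIdx h1 hi_lt hkey
        · simp only [hc2, if_false]
          have heq : l[(lo + hi) / 2].1.toList = city.toList :=
            le_antisymm (not_lt.mp hc2) (not_lt.mp hc1)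
          have hieq : i = (lo + hi) / 2 := by
            by_contra hne
            rcases Nat.lt_or_gt_of_ne hne with h | h
            · have hlt2 := sorted_keys_lt hs h hmid
              rw [hkey, heq] at hlt2
              exact lt_irrefl _ hlt2
            · have hlt2 := sorted_keys_lt hs h hIdx
              rw [hkey, heq] at hlt2
              exact lt_irrefl _ hlt2
          subst hieq
          rfl

-- binary search returns "Unknown" when no key in [lo, hi) matches
theorem bs_none (l : List (String × String)) (city : String) :
    ∀ n lo hi, hi - lo ≤ n → hi ≤ l.length →
      (∀ i (hIdx : i < l.length), lo ≤ i → i < hi → l[i].1 ≠ city) →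
        bsLoop l city lo hi = "Unknown" := by
  intro n
  induction n with
  | zero =>
      intro lo hi hn _ _
      rw [bsLoop]
      simp only [show ¬ lo < hi by omega, dite_false]
  | succ n ih =>
      intro lo hi hn hhi hnone
      by_cases hlt : lo < hi
      · have hmid : (lo + hi) / 2 < l.length := by omega
        rw [bsLoop]
        simp only [hlt, dite_true]
        rw [List.getD_eq_getElem l ("", "") hmid]
        by_cases hc1 : l[(lo + hi) / 2].1.toList < city.toList
        · simp only [hc1, if_true]
          exact ih ((lo + hi) / 2 + 1) hi (by omega) hhi
            (fun i hIdx h1 h2 => hnone i hIdx (by omega) h2)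
        · simp only [hc1, if_false]
          by_cases hc2 : city.toList < l[(lo + hi) / 2].1.toList
          · simp only [hc2, if_true]
            exact ih lo ((lo + hi) / 2) (by omega) (by omega)
              (fun i hIdx h1 h2 => hnone i hIdx h1 (by omega))
          · have heq : l[(lo + hi) / 2].1 = city :=
              String.toList_inj.mp (le_antisymm (not_lt.mp hc2) (not_lt.mp hc1))
            exact absurd heq (hnone _ hmid (by omega) (by omega))
      · rw [bsLoop]; simp only [hlt, dite_false]

theorem alt_eq_lookup (city : String) :
    get_region_for_city_alt city = lookupCity CITY_REGIONS city := by
  have hs : CITY_REGIONS.Pairwise (fun a b => a.1.toList < b.1.toList) := by decide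
  unfold get_region_for_city_alt lookupCity
  cases hf : CITY_REGIONS.find? (fun p => p.1 == city) with
  | some p =>
      have hmem : p ∈ CITY_REGIONS := List.mem_of_find?_eq_some hf
      have hkey : p.1 = city := by simpa using List.find?_some hf
      obtain ⟨i, hIdx, hEq⟩ := List.getElem_of_mem hmem
      have := bs_found CITY_REGIONS city hs CITY_REGIONS.length 0 CITY_REGIONS.length
        (by omega) (le_refl _) i hIdx (Nat.zero_le _) hIdx (by rw [hEq, hkey])
      rw [this, hEq]
  | none =>
      apply bs_none CITY_REGIONS city CITY_REGIONS.length 0 CITY_REGIONS.length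
        (by omega) (le_refl _)
      intro i hIdx _ _ hkey
      have := List.find?_eq_none.mp hf _ (List.getElem_mem hIdx)
      simp [hkey] at this

set_option maxRecDepth 4096 in
theorem flatten_perm : (flatten REGION_MAP).Perm CITY_REGIONS := by decide

set_option maxRecDepth 4096 in
theorem flatten_nodup : ((flatten REGION_MAP).map Prod.fst).Nodup := by decide

-- ===== VERDICT (by name: the statement is the Claim_ definition above) =====
theorem get_region_for_city_spec : Claim_equal_get_region_for_city := by
  intro city _
  unfold Spec_get_region_for_city get_region_for_city
  rw [aOuter_eq_flatten, alt_eq_lookup, lookupCity, lookupCity,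
    find?_key_perm flatten_perm flatten_nodup]
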